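-- pv_equiv track=rewrite | github.com/OriAmor123/my-repo | games/betting_slot_machine.py | adding_money_to_balance
-- ===== SOURCE A (Python) =====
-- def adding_money_to_balance(bet_on_each_line, lines_to_bet, value_win_list, symbol_values):
--     total_win = 0
--     if len(value_win_list)>0: #only if he won something
--         for value in value_win_list:
--             if lines_to_bet >0: #ensure the player wins doesn't win more that the lines he bet on
--                 row_win = symbol_values[value] * bet_on_each_line
--                 total_win+=row_win
--                 lines_to_bet-= 1 #for the ensurance too
--             else:
--                 break
--     return total_win
-- ===== SOURCE B (Python) =====
-- def adding_money_to_balance(bet_on_each_line, lines_to_bet, value_win_list, symbol_values):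
--     # Aggregate the paid prefix into per-symbol multiplicities, then sum
--     # value * multiplicity over the distinct symbols and scale by the bet once.
--     counts = {}
--     for v in value_win_list[:max(lines_to_bet, 0)]:
--         counts[v] = counts.get(v, 0) + 1
--     return bet_on_each_line * sum(symbol_values[s] * c for s, c in counts.items())
-- ===== Notes on version B (the rewrite author's own statement) =====
-- stated objective: alternative
-- what changed: Instead of A's single pass with a running total and a decremented line counter, B first aggregates the paid prefix of winning rows into a frequency dictionary, then sums symbol value times multiplicity over the distinct symbols and multiplies by the bet once.
import Mathlib
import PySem

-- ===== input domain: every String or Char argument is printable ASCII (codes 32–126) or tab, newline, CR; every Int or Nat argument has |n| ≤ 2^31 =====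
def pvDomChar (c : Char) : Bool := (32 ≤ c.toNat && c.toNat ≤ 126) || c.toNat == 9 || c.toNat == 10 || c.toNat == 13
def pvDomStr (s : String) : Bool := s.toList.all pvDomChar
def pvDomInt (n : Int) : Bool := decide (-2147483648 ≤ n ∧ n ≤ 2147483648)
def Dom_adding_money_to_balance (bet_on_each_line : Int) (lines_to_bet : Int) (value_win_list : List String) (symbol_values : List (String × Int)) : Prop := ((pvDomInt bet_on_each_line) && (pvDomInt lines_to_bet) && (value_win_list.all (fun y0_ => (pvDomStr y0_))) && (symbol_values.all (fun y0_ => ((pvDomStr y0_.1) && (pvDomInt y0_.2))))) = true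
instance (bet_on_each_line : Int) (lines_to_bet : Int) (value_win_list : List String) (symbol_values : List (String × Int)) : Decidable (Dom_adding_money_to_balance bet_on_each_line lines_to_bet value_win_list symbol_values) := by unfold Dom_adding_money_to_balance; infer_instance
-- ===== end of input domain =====

-- B replaces A's single pass with running total and decremented line counter by a two-stage
-- frequency-dictionary aggregation over the paid prefix (objective: alternative). Return value only.

-- ===== PORT A =====
-- the for-loop with mutable total_win and lines_to_bet, with the early break
def pvLoopA (bet_on_each_line : Int) (symbol_values : List (String × Int)) :
    List String → Int → Int → Int
  | [], _, total_win => total_win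
  | value :: rest, lines_to_bet, total_win =>
    if lines_to_bet > 0 then
      pvLoopA bet_on_each_line symbol_values rest (lines_to_bet - 1)
        (total_win + PySem.Dict.getD (PySem.Dict.mk symbol_values) value 0 * bet_on_each_line)
    else total_win  -- break

def adding_money_to_balance (bet_on_each_line : Int) (lines_to_bet : Int) (value_win_list : List String) (symbol_values : List (String × Int)) : Int :=
  if value_win_list.length > 0 then
    pvLoopA bet_on_each_line symbol_values value_win_list lines_to_bet 0
  else 0

-- ===== PORT B =====
-- stage 1: counts[v] = counts.get(v, 0) + 1 over the slice; stage 2: sum over counts.items()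
def adding_money_to_balance_alt (bet_on_each_line : Int) (lines_to_bet : Int) (value_win_list : List String) (symbol_values : List (String × Int)) : Int :=
  let counts := (value_win_list.take (max lines_to_bet 0).toNat).foldl
    (fun d v => d.insert v (d.getD v 0 + 1)) PySem.Dict.empty
  bet_on_each_line *
    (counts.items.map (fun p => PySem.Dict.getD (PySem.Dict.mk symbol_values) p.1 0 * p.2)).sum

-- ===== PRECONDITION & SPEC =====
-- Pre_ excludes exactly the inputs on which Python A raises KeyError: a symbol among the first
-- max(lines_to_bet,0) winning rows that is not a key of symbol_values.
def Pre_adding_money_to_balance (bet_on_each_line : Int) (lines_to_bet : Int) (value_win_list : List String) (symbol_values : List (String × Int)) : Prop :=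
  ∀ v ∈ value_win_list.take (max lines_to_bet 0).toNat,
    (PySem.Dict.get? (PySem.Dict.mk symbol_values) v).isSome = true
instance (bet_on_each_line : Int) (lines_to_bet : Int) (value_win_list : List String) (symbol_values : List (String × Int)) : Decidable (Pre_adding_money_to_balance bet_on_each_line lines_to_bet value_win_list symbol_values) := by unfold Pre_adding_money_to_balance; infer_instance

def pvWitness_adding_money_to_balance : Int × Int × List String × (List (String × Int)) :=
  (2, 2, ["A", "B", "A"], [("A", 5), ("B", 3)])

def Spec_adding_money_to_balance (bet_on_each_line : Int) (lines_to_bet : Int) (value_win_list : List String) (symbol_values : List (String × Int)) (out : Int) : Prop := out = adding_money_to_balance_alt bet_on_each_line lines_to_bet value_win_list symbol_values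
instance (bet_on_each_line : Int) (lines_to_bet : Int) (value_win_list : List String) (symbol_values : List (String × Int)) (out : Int) : Decidable (Spec_adding_money_to_balance bet_on_each_line lines_to_bet value_win_list symbol_values out) := by unfold Spec_adding_money_to_balance; infer_instance

-- ===== CLAIM (what is proved, stated in full; the proofs are below) =====
def Claim_equal_adding_money_to_balance : Prop := ∀ (bet_on_each_line : Int) (lines_to_bet : Int) (value_win_list : List String) (symbol_values : List (String × Int)), Dom_adding_money_to_balance bet_on_each_line lines_to_bet value_win_list symbol_values → Pre_adding_money_to_balance bet_on_each_line lines_to_bet value_win_list symbol_values → Spec_adding_money_to_balance bet_on_each_line lines_to_bet value_win_list symbol_values (adding_money_to_balance bet_on_each_line lines_to_bet value_win_list symbol_values)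

-- ===== LEMMAS AND PROOFS =====
-- A's loop computes: initial total + bet * sum of symbol values over the paid prefix.
lemma pvLoopA_eq (bet : Int) (sv : List (String × Int)) :
    ∀ (xs : List String) (lines total : Int),
      pvLoopA bet sv xs lines total =
        total + bet * ((xs.take (max lines 0).toNat).map (fun v => PySem.Dict.getD (PySem.Dict.mk sv) v 0)).sum := by
  intro xs
  induction xs with
  | nil => intro lines total; simp [pvLoopA]
  | cons v rest ih =>
    intro lines total
    by_cases h : lines > 0
    · have hnat : (max lines 0).toNat = (max (lines - 1) 0).toNat + 1 := by omega
      simp only [pvLoopA, if_pos h, ih, hnat, List.take_succ_cons, List.map_cons, List.sum_cons]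
      ring
    · have hnat : (max lines 0).toNat = 0 := by omega
      simp [pvLoopA, if_neg h, hnat]

-- picking the unique matching element out of a Nodup list
lemma sum_map_ite_single (f : String → Int) (x : String) :
    ∀ (S : List String), S.Nodup → x ∈ S →
      (S.map (fun k => if k = x then f k else 0)).sum = f x := by
  intro S
  induction S with
  | nil => intro _ hx; simp at hx
  | cons a S ih =>
    intro hnd hx
    rcases List.nodup_cons.mp hnd with ⟨ha, hndS⟩
    by_cases hax : a = x
    · subst hax
      have : (S.map (fun k => if k = a then f k else 0)).sum = 0 := by
        apply List.sum_eq_zero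
        intro y hy
        rcases List.mem_map.mp hy with ⟨k, hk, rfl⟩
        have hka : k ≠ a := fun h => ha (h ▸ hk)
        simp [hka]
      simp [this]
    · have hxS : x ∈ S := by
        rcases List.mem_cons.mp hx with h | h
        · exact absurd h.symm hax
        · exact h
      simp [hax, ih hndS hxS]

-- frequency aggregation: summing f weighted by multiplicities over the distinct symbols
-- equals summing f over the list itself
lemma sum_counts_eq (f : String → Int) :
    ∀ (xs S : List String), S.Nodup → (∀ v ∈ xs, v ∈ S) →
      (S.map (fun k => f k * (xs.count k : Int))).sum = (xs.map f).sum := by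
  intro xs
  induction xs with
  | nil => intro S _ _; simp
  | cons x xs ih =>
    intro S hnd hsub
    have hx : x ∈ S := hsub x (List.mem_cons_self)
    have hsub' : ∀ v ∈ xs, v ∈ S := fun v hv => hsub v (List.mem_cons_of_mem _ hv)
    have hsplit : ∀ k : String,
        f k * ((x :: xs).count k : Int) =
          f k * (xs.count k : Int) + (if k = x then f k else 0) := by
      intro k
      by_cases hk : k = x
      · simp [hk, List.count_cons_self]; ring
      · simp [List.count_cons, hk]
        exact Or.inl (fun h => hk h.symm)
    calc (S.map (fun k => f k * ((x :: xs).count k : Int))).sum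
        = (S.map (fun k => f k * (xs.count k : Int) + (if k = x then f k else 0))).sum := by
          congr 1; exact List.map_congr_left (fun k _ => hsplit k)
      _ = (S.map (fun k => f k * (xs.count k : Int))).sum
            + (S.map (fun k => if k = x then f k else 0)).sum := by
          rw [← List.sum_map_add]
      _ = (xs.map f).sum + f x := by
          rw [ih S hnd hsub', sum_map_ite_single f x S hnd hx]
      _ = ((x :: xs).map f).sum := by simp; ring

-- B's two stages compute bet * sum of symbol values over the paid prefix
lemma alt_eq (bet lines : Int) (vl : List String) (sv : List (String × Int)) :
    adding_money_to_balance_alt bet lines vl sv =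
      bet * ((vl.take (max lines 0).toNat).map (fun v => PySem.Dict.getD (PySem.Dict.mk sv) v 0)).sum := by
  show bet *
      (((vl.take (max lines 0).toNat).foldl (fun d v => d.insert v (d.getD v 0 + 1))
          PySem.Dict.empty).items.map
        (fun p => PySem.Dict.getD (PySem.Dict.mk sv) p.1 0 * p.2)).sum = _
  rw [PySem.Dict.foldl_insert_getD_add_one_eq_counter, PySem.Dict.items_counter]
  rw [List.map_map]
  congr 1
  exact sum_counts_eq (fun v => PySem.Dict.getD (PySem.Dict.mk sv) v 0)
    (vl.take (max lines 0).toNat) _ (PySem.Set.nodup_ofList _)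
    (fun v hv => (PySem.Set.mem_ofList _ v).mpr hv)

-- ===== VERDICT (by name: the statement is the Claim_ definition above) =====
theorem adding_money_to_balance_spec : Claim_equal_adding_money_to_balance := by
  intro bet lines vl sv _ _
  unfold Spec_adding_money_to_balance adding_money_to_balance
  rw [alt_eq]
  by_cases h : vl.length > 0
  · simp [if_pos h, pvLoopA_eq]
  · have : vl = [] := by
      cases vl with
      | nil => rfl
      | cons a b => simp at h
    simp [this]
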